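-- pv_equiv track=rewrite | github.com/goood2280/flow | backend/routers/ettime.py | _join_unique
-- ===== SOURCE A (Python) =====
-- def _join_unique(values, limit: int = 8) -> str:
--     out: list[str] = []
--     seen: set[str] = set()
--     for v in values or []:
--         s = str(v or "").strip()
--         if not s or s in seen:
--             continue
--         seen.add(s)
--         out.append(s)
--     if len(out) > limit:
--         return ", ".join(out[:limit]) + f" +{len(out) - limit}"
--     return ", ".join(out)
-- ===== SOURCE B (Python) =====
-- def _join_unique(values, limit: int = 8) -> str:
--     rest = [s for v in (values or []) if (s := str(v or "").strip())]
--     out = []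
--     while rest:
--         head = rest[0]
--         out.append(head)
--         rest = [x for x in rest[1:] if x != head]
--     if len(out) > limit:
--         return ", ".join(out[:limit]) + f" +{len(out) - limit}"
--     return ", ".join(out)
-- ===== Notes on version B (the rewrite author's own statement) =====
-- stated objective: alternative
-- what changed: Replaces the seen-set single pass by head-extraction dedup: after one cleaning comprehension, a loop repeatedly takes the first remaining string and filters all its copies out of the remainder, so no auxiliary seen set/dict exists at all; limit/suffix join unchanged.
import Mathlib
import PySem

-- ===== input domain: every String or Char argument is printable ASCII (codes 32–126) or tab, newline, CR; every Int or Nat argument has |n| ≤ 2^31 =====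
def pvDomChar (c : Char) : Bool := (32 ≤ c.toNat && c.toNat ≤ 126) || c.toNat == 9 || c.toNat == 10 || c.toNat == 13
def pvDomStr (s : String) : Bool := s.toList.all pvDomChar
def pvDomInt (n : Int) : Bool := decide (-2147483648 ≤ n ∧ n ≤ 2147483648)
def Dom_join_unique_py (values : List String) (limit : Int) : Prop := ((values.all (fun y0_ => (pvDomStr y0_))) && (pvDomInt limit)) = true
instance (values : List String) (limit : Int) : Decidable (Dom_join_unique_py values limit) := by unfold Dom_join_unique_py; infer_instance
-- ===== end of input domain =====

-- B drops A's seen-set pass: it cleans once, then dedups by repeatedly taking the first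
-- remaining string and filtering its copies out of the remainder (alternative; same result).

-- ===== PORT A =====
-- 'str(v or "")' on a string v: v if nonempty else "" (str of a str is itself)
def join_unique_py (values : List String) (limit : Int) : String :=
  let st := (if values = [] then [] else values).foldl
    (fun (acc : List String × PySem.Set String) v =>
      let s := PySem.Str.strip (if v = "" then "" else v)
      if s = "" ∨ s ∈ acc.2 then acc
      else (acc.1 ++ [s], PySem.Set.add acc.2 s))
    ([], PySem.Set.empty)
  let out := st.1
  if limit < (out.length : Int) then
    PySem.Str.join ", " (PySem.List.slice out none (some limit)) ++ " +" ++ PySem.Int.toStr ((out.length : Int) - limit)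
  else
    PySem.Str.join ", " out

-- ===== PORT B =====
-- the while loop of Source B: take the head, append it, filter it out of the rest
def pvNubLoop (out rest : List String) : List String :=
  if hne : rest = [] then out
  else pvNubLoop (out ++ [rest.head hne]) (rest.tail.filter (fun x => x != rest.head hne))
termination_by rest.length
decreasing_by
  have h1 := List.length_filter_le (fun x => x != rest.head hne) rest.tail
  have h2 : rest.tail.length < rest.length := by
    cases rest with
    | nil => exact absurd rfl hne
    | cons a t => simp
  omega

def join_unique_py_alt (values : List String) (limit : Int) : String :=
  let cleaned := (if values = [] then [] else values).filterMap
    (fun v => let s := PySem.Str.strip (if v = "" then "" else v)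
              if s = "" then none else some s)
  let out := pvNubLoop [] cleaned
  if limit < (out.length : Int) then
    PySem.Str.join ", " (PySem.List.slice out none (some limit)) ++ " +" ++ PySem.Int.toStr ((out.length : Int) - limit)
  else
    PySem.Str.join ", " out

-- ===== PRECONDITION & SPEC =====
def Spec_join_unique_py (values : List String) (limit : Int) (out : String) : Prop := out = join_unique_py_alt values limit
instance (values : List String) (limit : Int) (out : String) : Decidable (Spec_join_unique_py values limit out) := by unfold Spec_join_unique_py; infer_instance

-- ===== CLAIM (what is proved, stated in full; the proofs are below) =====
def Claim_equal_join_unique_py : Prop := ∀ (values : List String) (limit : Int), Dom_join_unique_py values limit → Spec_join_unique_py values limit (join_unique_py values limit)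

-- ===== LEMMAS AND PROOFS =====

-- the cleaning step shared by both ports
def pvClean (v : String) : String := PySem.Str.strip (if v = "" then "" else v)

-- A's paired state (out, seen) stays diagonal: both components are the same list.
theorem pv_fused_diag (vs : List String) (out : List String) :
    vs.foldl
      (fun (acc : List String × PySem.Set String) v =>
        if pvClean v = "" ∨ pvClean v ∈ acc.2 then acc
        else (acc.1 ++ [pvClean v], PySem.Set.add acc.2 (pvClean v)))
      (out, out)
    = (vs.foldl (fun acc v =>
        if pvClean v = "" ∨ pvClean v ∈ acc then acc else PySem.Set.add acc (pvClean v)) out,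
       vs.foldl (fun acc v =>
        if pvClean v = "" ∨ pvClean v ∈ acc then acc else PySem.Set.add acc (pvClean v)) out) := by
  induction vs generalizing out with
  | nil => rfl
  | cons v vs ih =>
    simp only [List.foldl_cons]
    by_cases h : pvClean v = "" ∨ pvClean v ∈ out
    · rw [if_pos h, if_pos h]
      exact ih out
    · have hm : ¬ pvClean v ∈ out := fun hmem => h (Or.inr hmem)
      have hadd : PySem.Set.add out (pvClean v) = out ++ [pvClean v] := by
        simp [PySem.Set.add, PySem.Set.contains, hm]
      rw [if_neg h, if_neg h, ← hadd]
      exact ih (PySem.Set.add out (pvClean v))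

-- the single-accumulator fused fold is Set.update with the cleaned list
theorem pv_fused_eq_update (vs : List String) (acc : List String) :
    vs.foldl (fun acc v =>
        if pvClean v = "" ∨ pvClean v ∈ acc then acc else PySem.Set.add acc (pvClean v)) acc
    = PySem.Set.update acc
        (vs.filterMap (fun v => if pvClean v = "" then none else some (pvClean v))) := by
  induction vs generalizing acc with
  | nil => simp [PySem.Set.update]
  | cons v vs ih =>
    simp only [List.foldl_cons, List.filterMap_cons]
    by_cases hs : pvClean v = ""
    · rw [if_pos (Or.inl hs), if_pos hs]
      exact ih acc
    · rw [if_neg hs]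
      by_cases hm : pvClean v ∈ acc
      · have hadd : PySem.Set.add acc (pvClean v) = acc := by
          simp [PySem.Set.add, PySem.Set.contains, hm]
        rw [if_pos (Or.inr hm), PySem.Set.update_cons, hadd]
        exact ih acc
      · rw [if_neg (by rintro (h | h); exacts [hs h, hm h]), PySem.Set.update_cons]
        exact ih (PySem.Set.add acc (pvClean v))

-- A's deduped list equals dedup of the cleaned list
theorem pv_out_eq (vs : List String) :
    (vs.foldl
      (fun (acc : List String × PySem.Set String) v =>
        if pvClean v = "" ∨ pvClean v ∈ acc.2 then acc
        else (acc.1 ++ [pvClean v], PySem.Set.add acc.2 (pvClean v)))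
      ([], PySem.Set.empty)).1
    = PySem.List.dedup
        (vs.filterMap (fun v => if pvClean v = "" then none else some (pvClean v))) := by
  rw [show (([], PySem.Set.empty) : List String × PySem.Set String)
        = (([] : List String), ([] : List String)) from rfl,
      pv_fused_diag vs []]
  rw [pv_fused_eq_update]
  simp [PySem.List.dedup_eq_ofList, ← PySem.Set.update_nil_left]

-- filtering an already-seen element out does not change the Set fold
theorem pv_foldl_add_filter (h : String) (t : List String) (acc : List String) (hm : h ∈ acc) :
    List.foldl PySem.Set.add acc (t.filter (fun x => x != h))
      = List.foldl PySem.Set.add acc t := by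
  induction t generalizing acc with
  | nil => rfl
  | cons x t ih =>
    by_cases hx : x = h
    · subst hx
      have : PySem.Set.add acc x = acc := by
        simp [PySem.Set.add, PySem.Set.contains, hm]
      simp [ih acc hm, this]
    · have hne : (x != h) = true := by simp [hx]
      simp only [List.filter_cons, hne, if_pos, List.foldl_cons]
      exact ih (PySem.Set.add acc x) (by simp [PySem.Set.add]; split <;> simp [hm])

-- a head absent from the rest passes through the Set fold
theorem pv_foldl_add_head (a : String) (s : List String) (t : List String) (ha : a ∉ t) :
    List.foldl PySem.Set.add (a :: s) t = a :: List.foldl PySem.Set.add s t := by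
  induction t generalizing s with
  | nil => rfl
  | cons x t ih =>
    have hxa : x ≠ a := fun e => ha (by simp [e])
    have : PySem.Set.add (a :: s) x = a :: PySem.Set.add s x := by
      simp [PySem.Set.add, PySem.Set.contains, hxa]
      split <;> simp
    simp only [List.foldl_cons, this]
    exact ih (PySem.Set.add s x) (fun hmem => ha (List.mem_cons_of_mem _ hmem))

-- dedup unfolds exactly as the head-extraction loop proceeds
theorem pv_dedup_cons (h : String) (t : List String) :
    PySem.List.dedup (h :: t) = h :: PySem.List.dedup (t.filter (fun x => x != h)) := by
  have h1 : PySem.List.dedup (h :: t) = List.foldl PySem.Set.add [h] t := by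
    simp [PySem.List.dedup_eq_ofList, PySem.Set.ofList_eq_foldl, PySem.Set.add,
      PySem.Set.contains]
  have h2 : PySem.List.dedup (t.filter (fun x => x != h))
      = List.foldl PySem.Set.add [] (t.filter (fun x => x != h)) := by
    simp [PySem.List.dedup_eq_ofList, PySem.Set.ofList_eq_foldl]
  rw [h1, ← pv_foldl_add_filter h t [h] (by simp),
      pv_foldl_add_head h [] _ (by simp), h2]

-- B's loop computes dedup
theorem pv_nubLoop_eq (rest out : List String) :
    pvNubLoop out rest = out ++ PySem.List.dedup rest := by
  induction out, rest using pvNubLoop.induct with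
  | case1 out =>
    simp [pvNubLoop, PySem.List.dedup_eq_ofList, PySem.Set.ofList_eq_foldl]
  | case2 out rest hne ih =>
    obtain ⟨h, t, rfl⟩ : ∃ h t, rest = h :: t := by
      cases rest with
      | nil => exact absurd rfl hne
      | cons a b => exact ⟨a, b, rfl⟩
    rw [pvNubLoop]
    simp only [List.head_cons, List.tail_cons] at ih ⊢
    rw [ih, pv_dedup_cons]
    simp

-- ===== VERDICT (by name: the statement is the Claim_ definition above) =====
theorem join_unique_py_spec : Claim_equal_join_unique_py := by
  intro values limit _
  unfold Spec_join_unique_py join_unique_py join_unique_py_alt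
  have hA := pv_out_eq (if values = [] then [] else values)
  have hB := pv_nubLoop_eq
    ((if values = [] then [] else values).filterMap
      (fun v => if pvClean v = "" then none else some (pvClean v))) []
  simp only [pvClean] at hA hB
  simp only [hA, hB, List.nil_append]
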